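-- pv_equiv track=rewrite | github.com/lulopez27/ProyectoGrupal-Arqui1 | FantasmCompiler/FantASMCompiler.py | shiftNumber
-- ===== SOURCE A (Python) =====
-- def shiftNumber(num, shift):
--     largo = len(num)
--     if (largo < shift):
--         while largo < shift:
--             num = '0' + num
--             largo += 1
--         return num
--     else:
--         return num
-- ===== SOURCE B (Python) =====
-- def shiftNumber(num, shift):
--     return '0' * (shift - len(num)) + num
-- ===== Notes on version B (the rewrite author's own statement) =====
-- stated objective: simpler
-- what changed: Replaces the while-loop that prepends '0' one character at a time with a closed-form pad count and a single '0' * pad + num concatenation.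
import Mathlib
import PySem

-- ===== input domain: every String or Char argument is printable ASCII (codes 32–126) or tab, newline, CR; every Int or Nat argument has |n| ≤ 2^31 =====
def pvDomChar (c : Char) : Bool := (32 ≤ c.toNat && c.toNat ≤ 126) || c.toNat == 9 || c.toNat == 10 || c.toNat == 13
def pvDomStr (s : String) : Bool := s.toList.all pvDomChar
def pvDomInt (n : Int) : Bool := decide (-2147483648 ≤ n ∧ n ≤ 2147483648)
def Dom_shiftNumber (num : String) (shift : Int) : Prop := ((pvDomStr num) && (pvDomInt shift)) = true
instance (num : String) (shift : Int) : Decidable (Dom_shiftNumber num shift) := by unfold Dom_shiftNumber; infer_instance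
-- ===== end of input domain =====

-- B replaces A's character-by-character prepend loop with a closed-form pad count and one concatenation (objective: simpler).


-- ===== PORT A =====
-- the while loop: while largo < shift: num = '0' + num; largo += 1
def shiftNumberLoop (num : String) (largo shift : Int) : String :=
  if largo < shift then shiftNumberLoop ("0" ++ num) (largo + 1) shift else num
termination_by (shift - largo).toNat
decreasing_by omega

def shiftNumber (num : String) (shift : Int) : String :=
  let largo : Int := (num.length : Int)
  if largo < shift then shiftNumberLoop num largo shift else num

-- ===== PORT B =====
-- '0' * (shift - len(num)) + num  ('0' * n is '' for n ≤ 0, as Int.toNat clamps)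
def shiftNumber_alt (num : String) (shift : Int) : String :=
  String.ofList (List.replicate (shift - (num.length : Int)).toNat '0') ++ num

-- ===== PRECONDITION & SPEC =====
def Spec_shiftNumber (num : String) (shift : Int) (out : String) : Prop := out = shiftNumber_alt num shift
instance (num : String) (shift : Int) (out : String) : Decidable (Spec_shiftNumber num shift out) := by unfold Spec_shiftNumber; infer_instance

-- ===== CLAIM (what is proved, stated in full; the proofs are below) =====
def Claim_equal_shiftNumber : Prop := ∀ (num : String) (shift : Int), Dom_shiftNumber num shift → Spec_shiftNumber num shift (shiftNumber num shift)

-- ===== LEMMAS AND PROOFS =====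
theorem shiftNumberLoop_eq (k : Nat) : ∀ (num : String) (largo shift : Int),
    (shift - largo).toNat = k →
    shiftNumberLoop num largo shift = String.ofList (List.replicate k '0') ++ num := by
  induction k with
  | zero =>
    intro num largo shift h
    rw [shiftNumberLoop]
    rw [if_neg (by omega : ¬ largo < shift)]
    apply String.toList_inj.mp
    simp
  | succ n ih =>
    intro num largo shift h
    rw [shiftNumberLoop, if_pos (by omega : largo < shift),
        ih ("0" ++ num) (largo + 1) shift (by omega)]
    apply String.toList_inj.mp
    simp [List.replicate_succ']

-- ===== VERDICT (by name: the statement is the Claim_ definition above) =====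
theorem shiftNumber_spec : Claim_equal_shiftNumber := by
  intro num shift _
  show shiftNumber num shift = shiftNumber_alt num shift
  unfold shiftNumber shiftNumber_alt
  by_cases h : (num.length : Int) < shift
  · simp only [if_pos h]
    exact shiftNumberLoop_eq _ num _ shift rfl
  · simp only [if_neg h]
    have : (shift - (num.length : Int)).toNat = 0 := by omega
    rw [this]
    apply String.toList_inj.mp
    simp
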